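-- pv_equiv track=rewrite | github.com/thiagomuller/code-wars-challenges | prime_words.py | prime_word
-- ===== SOURCE A (Python) =====
-- def prime_number(num):
--     prime_counter = 0
--     for var in range(1,num+1):
--         if(num % var == 0 or num % var == num):
--             prime_counter += 1
--     return (prime_counter == 2)
--
-- def prime_word(array):
--
--     result_list = []
--
--     for var in array:
--
--         counter = 0
--
--
--         for wrd in var[0]:
--             if prime_number(ord(wrd) + var[1]):
--                 counter += 1
--
--
--         if counter >= 1:
--             result_list.append(1)
--         else:
--             result_list.append(0)
--
--     return result_list
-- ===== SOURCE B (Python) =====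
-- def prime_word(array):
--     def is_prime(n):
--         if n < 2:
--             return False
--         d = 2
--         while d * d <= n:
--             if n % d == 0:
--                 return False
--             d += 1
--         return True
--
--     return [1 if any(is_prime(ord(c) + shift) for c in word) else 0
--             for word, shift in array]
-- ===== Notes on version B (the rewrite author's own statement) =====
-- stated objective: faster
-- what changed: Replaces A's primality test (counting all divisors of n by scanning 1..n) with trial division up to sqrt(n) that exits at the first divisor, and replaces the per-word counter loop with a short-circuiting any() over the characters.
import Mathlib
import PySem

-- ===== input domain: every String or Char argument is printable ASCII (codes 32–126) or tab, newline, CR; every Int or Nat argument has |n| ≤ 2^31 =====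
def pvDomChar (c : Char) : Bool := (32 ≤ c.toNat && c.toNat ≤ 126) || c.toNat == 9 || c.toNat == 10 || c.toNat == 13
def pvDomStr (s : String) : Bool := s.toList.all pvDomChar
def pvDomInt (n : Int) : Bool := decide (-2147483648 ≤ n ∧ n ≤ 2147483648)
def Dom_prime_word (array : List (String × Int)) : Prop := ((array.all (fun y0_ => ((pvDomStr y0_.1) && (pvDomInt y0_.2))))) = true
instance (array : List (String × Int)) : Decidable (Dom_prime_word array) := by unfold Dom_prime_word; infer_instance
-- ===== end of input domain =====

-- B replaces A's divisor-counting primality scan over 1..n by trial division with early exit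
-- (the loop stops at the first d with d*d > n), and the per-word counter by a short-circuiting any.

-- ===== PORT A =====
def prime_number (num : Int) : Bool :=
  let prime_counter : Int :=
    (PySem.List.pyRange 1 (num + 1) 1).foldl
      (fun c v => if PySem.Int.mod num v = 0 ∨ PySem.Int.mod num v = num then c + 1 else c) 0
  prime_counter == 2

def prime_word (array : List (String × Int)) : List Int :=
  array.foldl
    (fun result_list var =>
      let counter : Int :=
        var.1.toList.foldl
          (fun c w => if prime_number ((w.toNat : Int) + var.2) then c + 1 else c) 0
      if counter ≥ 1 then result_list ++ [1] else result_list ++ [0])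
    []

-- ===== PORT B =====
def isPrimeLoop (n d : Int) : Bool :=
  if h1 : d * d ≤ n then
    if h2 : PySem.Int.mod n d = 0 then false
    else isPrimeLoop n (d + 1)
  else true
termination_by (n - d).toNat
decreasing_by
  have hd : d < n := by
    by_cases hd2 : 2 ≤ d
    · nlinarith
    · by_cases hd1 : d = 1
      · exact absurd ((PySem.Int.mod_eq_zero_iff_dvd n d).mpr (hd1 ▸ one_dvd n)) h2
      · by_cases hd0 : d = 0
        · have hn0 : n ≠ 0 := fun h => h2 ((PySem.Int.mod_eq_zero_iff_dvd n d).mpr (by simp [hd0, h]))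
          subst hd0; omega
        · have : d < 0 := by omega
          nlinarith [mul_self_nonneg d]
  omega

def isPrimeAlt (n : Int) : Bool :=
  if n < 2 then false else isPrimeLoop n 2

def prime_word_alt (array : List (String × Int)) : List Int :=
  array.map (fun var =>
    if var.1.toList.any (fun c => isPrimeAlt ((c.toNat : Int) + var.2)) then 1 else 0)

-- ===== PRECONDITION & SPEC =====
def Spec_prime_word (array : List (String × Int)) (out : List Int) : Prop := out = prime_word_alt array
instance (array : List (String × Int)) (out : List Int) : Decidable (Spec_prime_word array out) := by unfold Spec_prime_word; infer_instance

-- ===== CLAIM (what is proved, stated in full; the proofs are below) =====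
def Claim_equal_prime_word : Prop := ∀ (array : List (String × Int)), Dom_prime_word array → Spec_prime_word array (prime_word array)

-- ===== LEMMAS AND PROOFS =====

-- "n has no divisor strictly between 1 and n"
def NoDiv (n : Int) : Prop := ∀ k : Int, 2 ≤ k → k < n → ¬ k ∣ n

theorem prime_number_iff (num : Int) :
    prime_number num = true ↔ (2 ≤ num ∧ NoDiv num) := by
  unfold prime_number
  have hfun : (fun (c : Int) v => if PySem.Int.mod num v = 0 ∨ PySem.Int.mod num v = num then c + 1 else c)
      = (fun (c : Int) v => if (fun v => decide (PySem.Int.mod num v = 0 ∨ PySem.Int.mod num v = num)) v = true then c + 1 else c) := by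
    funext c v; simp
  by_cases h2 : 2 ≤ num
  · rw [PySem.List.pyRange_one_append 1 2 (num+1) (by omega) (by omega),
        PySem.List.pyRange_one_append 2 num (num+1) (by omega) (by omega),
        PySem.List.pyRange_one_cons (show (1:Int) < 2 by omega),
        show (1:Int)+1 = 2 from rfl,
        PySem.List.pyRange_one_eq_nil (le_refl (2:Int))]
    rw [show PySem.List.pyRange num (num+1) = [num] from PySem.List.pyRange_one_singleton num]
    rw [hfun, PySem.List.foldl_count_if]
    simp only [List.countP_append, List.countP_cons, List.countP_nil]
    have hdvd : ∀ v : Int, 1 ≤ v → v ≤ num →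
        (decide (PySem.Int.mod num v = 0 ∨ PySem.Int.mod num v = num) = true ↔ v ∣ num) := by
      intro v h1 hn
      have hmod := PySem.Int.mod_eq_emod_of_pos (a := num) (show (0:Int) < v by omega)
      have hlt : num % v < v := Int.emod_lt_of_pos num (by omega)
      have hge : 0 ≤ num % v := Int.emod_nonneg num (by omega)
      simp only [decide_eq_true_iff, hmod]
      constructor
      · rintro (h | h)
        · exact Int.dvd_of_emod_eq_zero h
        · omega
      · intro h; exact Or.inl (Int.emod_eq_zero_of_dvd h)
    have hone : (decide (PySem.Int.mod num 1 = 0 ∨ PySem.Int.mod num 1 = num)) = true := by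
      rw [hdvd 1 (le_refl _) (by omega)]; exact one_dvd num
    have hself : (decide (PySem.Int.mod num num = 0 ∨ PySem.Int.mod num num = num)) = true := by
      rw [hdvd num (by omega) (le_refl _)]
    rw [hone, hself]
    have hmid : List.countP (fun v => decide (PySem.Int.mod num v = 0 ∨ PySem.Int.mod num v = num)) (PySem.List.pyRange 2 num)
        = List.countP (fun v => decide (v ∣ num)) (PySem.List.pyRange 2 num) := by
      apply List.countP_congr
      intro v hv
      rw [PySem.List.mem_pyRange_one] at hv
      simp only [decide_eq_true_iff] at *
      rw [← decide_eq_true_iff (p := v ∣ num)] at *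
      simp only [decide_eq_true_iff]
      exact ⟨fun h => (hdvd v (by omega) (by omega)).mp (by simpa), fun h => by simpa using (hdvd v (by omega) (by omega)).mpr h⟩
    rw [hmid]
    simp only [beq_iff_eq]
    constructor
    · intro h
      refine ⟨h2, ?_⟩
      intro k hk hkn hkdvd
      have hz : List.countP (fun v => decide (v ∣ num)) (PySem.List.pyRange 2 num) = 0 := by
        simp at h; omega
      rw [List.countP_eq_zero] at hz
      exact hz k (PySem.List.mem_pyRange_one.mpr ⟨hk, hkn⟩) (by simpa)
    · rintro ⟨-, hnd⟩
      have hz : List.countP (fun v => decide (v ∣ num)) (PySem.List.pyRange 2 num) = 0 := by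
        rw [List.countP_eq_zero]
        intro v hv
        rw [PySem.List.mem_pyRange_one] at hv
        simpa using hnd v hv.1 hv.2
      simp [hz]
  · constructor
    · intro h; exfalso
      rcases (show num ≤ 0 ∨ num = 1 by omega) with h0 | h1
      · rw [PySem.List.pyRange_one_eq_nil (by omega)] at h
        simp at h
      · subst h1; revert h; decide
    · rintro ⟨h, -⟩; omega

theorem isPrimeLoop_spec (n : Int) (d : Int) (hd : 2 ≤ d) :
    isPrimeLoop n d = true ↔ ∀ k : Int, d ≤ k → k * k ≤ n → ¬ k ∣ n := by
  induction d using isPrimeLoop.induct (n := n) with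
  | case1 d h1 h2 =>
    rw [isPrimeLoop, dif_pos h1, dif_pos h2]
    simp only [Bool.false_eq_true, false_iff]
    intro h
    exact h d (le_refl d) h1 ((PySem.Int.mod_eq_zero_iff_dvd n d).mp h2)
  | case2 d h1 h2 ih =>
    rw [isPrimeLoop, dif_pos h1, dif_neg h2]
    rw [ih (by omega)]
    constructor
    · intro h k hk hkk
      rcases eq_or_lt_of_le hk with rfl | hlt
      · exact fun hdvd => h2 ((PySem.Int.mod_eq_zero_iff_dvd n d).mpr hdvd)
      · exact h k (by omega) hkk
    · exact fun h k hk hkk => h k (by omega) hkk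
  | case3 d h1 =>
    rw [isPrimeLoop, dif_neg h1]
    simp only [true_iff]
    intro k hk hkk
    exfalso; apply h1; nlinarith

theorem isPrimeAlt_iff (n : Int) :
    isPrimeAlt n = true ↔ (2 ≤ n ∧ NoDiv n) := by
  unfold isPrimeAlt
  by_cases h2 : n < 2
  · simp only [if_pos h2, Bool.false_eq_true, false_iff]
    rintro ⟨h, -⟩; omega
  · rw [if_neg h2, isPrimeLoop_spec n 2 (le_refl _)]
    push Not at h2
    constructor
    · intro h
      refine ⟨h2, ?_⟩
      intro k hk hkn hkdvd
      obtain ⟨j, hj⟩ := hkdvd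
      have hjdvd : j ∣ n := ⟨k, by linarith [hj]⟩
      have hk0 : 0 < k := by omega
      have hj2 : 2 ≤ j := by
        rcases (show j ≤ 0 ∨ j = 1 ∨ 2 ≤ j by omega) with hj0 | hj1 | hjok
        · nlinarith
        · rw [hj1, mul_one] at hj; omega
        · exact hjok
      by_cases hkk : k * k ≤ n
      · exact h k hk hkk ⟨j, hj⟩
      · have hjk : j < k := by nlinarith
        exact h j hj2 (by nlinarith) hjdvd
    · rintro ⟨-, hnd⟩
      intro k hk hkk hkdvd
      exact hnd k hk (by nlinarith) hkdvd

theorem prime_number_eq_isPrimeAlt : prime_number = isPrimeAlt := by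
  funext n; rw [Bool.eq_iff_iff, prime_number_iff, isPrimeAlt_iff]

theorem prime_word_eq (array : List (String × Int)) : prime_word array = prime_word_alt array := by
  unfold prime_word prime_word_alt
  have hbody : (fun (result_list : List Int) (var : String × Int) =>
      let counter : Int :=
        var.1.toList.foldl
          (fun c w => if prime_number ((w.toNat : Int) + var.2) then c + 1 else c) 0
      if counter ≥ 1 then result_list ++ [1] else result_list ++ [0])
      = (fun result_list var => result_list ++
          [(fun (var : String × Int) =>
             if var.1.toList.any (fun c => isPrimeAlt ((c.toNat : Int) + var.2)) then (1:Int) else 0) var]) := by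
    funext rl var
    show (if (var.1.toList.foldl
          (fun c w => if prime_number ((w.toNat : Int) + var.2) then c + 1 else c) 0) ≥ 1
        then rl ++ [1] else rl ++ [0]) = _
    have hfun : (fun (c : Int) (w : Char) => if prime_number ((w.toNat : Int) + var.2) then c + 1 else c)
        = (fun (c : Int) (w : Char) => if (fun (w : Char) => prime_number ((w.toNat : Int) + var.2)) w = true then c + 1 else c) := by
      funext c w; simp
    rw [hfun, PySem.List.foldl_count_if, ← prime_number_eq_isPrimeAlt]
    have key : ((0 : Int) + ↑(List.countP (fun (w : Char) => prime_number ((w.toNat : Int) + var.2)) var.1.toList) ≥ 1)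
        ↔ var.1.toList.any (fun (w : Char) => prime_number ((w.toNat : Int) + var.2)) = true := by
      rw [List.any_eq_true, ← List.countP_pos_iff]
      omega
    by_cases h : var.1.toList.any (fun (w : Char) => prime_number ((w.toNat : Int) + var.2)) = true
    · simp only [if_pos (key.mpr h)]; simp [h]
    · simp only [if_neg (fun hc => h (key.mp hc))]; simp [h]
  rw [hbody, PySem.List.foldl_append_singleton_eq_map]
  simp

-- ===== VERDICT (by name: the statement is the Claim_ definition above) =====
theorem prime_word_spec : Claim_equal_prime_word := by
  intro array _
  exact prime_word_eq array
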